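-- pv_equiv track=rewrite | github.com/vaibhavturaga/ECE404 | HW03/mult_inv.py | bit_mult
-- ===== SOURCE A (Python) =====
-- def bit_mult(a, b):
--     output = 0
--     while b > 0:
--         # if b is odd
--         if(b & 1):
--             output += a
--         #divides b by 2 and multiplies a * 2
--         a = a << 1
--         b = b >> 1
--
--     return output
-- ===== SOURCE B (Python) =====
-- def bit_mult(a, b):
--     # closed form: the shift-and-add loop computes a*b for positive b, 0 otherwise
--     return a * b if b > 0 else 0
-- ===== Notes on version B (the rewrite author's own statement) =====
-- stated objective: simpler
-- what changed: Replaced the bit-by-bit shift-and-add loop with the closed form a*b guarded by b > 0 (the loop returns 0 for non-positive b).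
import Mathlib
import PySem

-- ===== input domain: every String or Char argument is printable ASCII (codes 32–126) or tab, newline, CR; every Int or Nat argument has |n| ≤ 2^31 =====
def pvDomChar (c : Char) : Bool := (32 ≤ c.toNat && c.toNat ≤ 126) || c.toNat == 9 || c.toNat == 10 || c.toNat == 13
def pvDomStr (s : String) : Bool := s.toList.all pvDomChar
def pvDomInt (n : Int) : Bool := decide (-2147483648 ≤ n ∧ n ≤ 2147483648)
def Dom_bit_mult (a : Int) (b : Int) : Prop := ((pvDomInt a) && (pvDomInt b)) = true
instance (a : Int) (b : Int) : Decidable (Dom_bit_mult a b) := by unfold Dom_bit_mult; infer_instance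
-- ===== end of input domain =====

-- B replaces A's shift-and-add loop by the closed form a*b (with 0 for non-positive b): simpler.

-- ===== PORT A =====
-- the while loop of A: state (a, b, output); b & 1 ≠ 0 ↔ b % 2 = 1 for b > 0;
-- a << 1 = a * 2; b >> 1 = b floordiv 2 (Python arithmetic shift)
def bitMultLoop (a : Int) (b : Int) (output : Int) : Int :=
  if h : b > 0 then
    bitMultLoop (a * 2) (b / 2) (if b % 2 = 1 then output + a else output)
  else
    output
termination_by b.toNat
decreasing_by
  have : b / 2 < b := by omega
  omega

def bit_mult (a : Int) (b : Int) : Int := bitMultLoop a b 0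

-- ===== PORT B =====
def bit_mult_alt (a : Int) (b : Int) : Int := if b > 0 then a * b else 0

-- ===== PRECONDITION & SPEC =====
def Spec_bit_mult (a : Int) (b : Int) (out : Int) : Prop := out = bit_mult_alt a b
instance (a : Int) (b : Int) (out : Int) : Decidable (Spec_bit_mult a b out) := by unfold Spec_bit_mult; infer_instance

-- ===== CLAIM (what is proved, stated in full; the proofs are below) =====
def Claim_equal_bit_mult : Prop := ∀ (a : Int) (b : Int), Dom_bit_mult a b → Spec_bit_mult a b (bit_mult a b)

-- ===== LEMMAS AND PROOFS =====
-- loop invariant: for b ≥ 0 the loop adds a * b to the accumulator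
theorem bitMultLoop_eq (n : Nat) : ∀ (a b output : Int), 0 ≤ b → b.toNat ≤ n →
    bitMultLoop a b output = output + a * b := by
  induction n with
  | zero =>
    intro a b output hb hn
    have : b = 0 := by omega
    subst this
    rw [bitMultLoop]
    simp
  | succ n ih =>
    intro a b output hb hn
    rw [bitMultLoop]
    by_cases h : b > 0
    · rw [dif_pos h, ih (a * 2) (b / 2) (if b % 2 = 1 then output + a else output)
        (by omega) (by omega)]
      have hdm := Int.ediv_add_emod b 2
      split_ifs with hm
      · linear_combination a * hdm - a * hm
      · have hm0 : b % 2 = 0 := by omega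
        linear_combination a * hdm - a * hm0
    · rw [dif_neg h]
      have hb0 : b = 0 := by omega
      subst hb0
      ring

-- ===== VERDICT (by name: the statement is the Claim_ definition above) =====
theorem bit_mult_spec : Claim_equal_bit_mult := by
  intro a b _
  unfold Spec_bit_mult bit_mult bit_mult_alt
  by_cases h : b > 0
  · rw [bitMultLoop_eq b.toNat a b 0 (by omega) (le_refl _)]
    simp [h]
  · rw [bitMultLoop]
    simp [h]
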